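-- pv_equiv track=rewrite | github.com/giorgia-nadizar/interpretable-control-competition | beluga/encoder/utils.py | get_necessary_numbers
-- ===== SOURCE A (Python) =====
-- def get_necessary_numbers(jig_sizes, rack_sizes) -> set[int]:
--
--         numbers = set()
--         numbers.add(0)
--         numbers.update(rack_sizes)
--         changed = True
--
--         while changed:
--             new_numbers = set()
--             for rack in numbers:
--                 for jig in jig_sizes:
--                     new_number = rack - jig
--                     if (new_number >= 0):
--                         new_numbers.add(new_number)
--
--             changed = not new_numbers.issubset(numbers)
--             numbers.update(new_numbers)
--
--         numbers.update(jig_sizes)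
--         return numbers
-- ===== SOURCE B (Python) =====
-- def get_necessary_numbers(jig_sizes, rack_sizes) -> set[int]:
--     # Worklist/frontier BFS: each reachable number is expanded exactly once,
--     # instead of rescanning the whole set on every round.
--     numbers = {0}
--     frontier = [0]
--     for r in rack_sizes:
--         if r not in numbers:
--             numbers.add(r)
--             frontier.append(r)
--     while frontier:
--         new_frontier = []
--         for rack in frontier:
--             for jig in jig_sizes:
--                 n = rack - jig
--                 if n >= 0 and n not in numbers:
--                     numbers.add(n)
--                     new_frontier.append(n)
--         frontier = new_frontier
--     numbers.update(jig_sizes)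
--     return numbers
-- ===== Notes on version B (the rewrite author's own statement) =====
-- stated objective: faster
-- what changed: Replaced the fixed-point loop that rescans the entire set of numbers on every round with a frontier/worklist BFS that expands each reachable number exactly once (membership-checked at generation instead of a whole-set subset test per round).
import Mathlib
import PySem

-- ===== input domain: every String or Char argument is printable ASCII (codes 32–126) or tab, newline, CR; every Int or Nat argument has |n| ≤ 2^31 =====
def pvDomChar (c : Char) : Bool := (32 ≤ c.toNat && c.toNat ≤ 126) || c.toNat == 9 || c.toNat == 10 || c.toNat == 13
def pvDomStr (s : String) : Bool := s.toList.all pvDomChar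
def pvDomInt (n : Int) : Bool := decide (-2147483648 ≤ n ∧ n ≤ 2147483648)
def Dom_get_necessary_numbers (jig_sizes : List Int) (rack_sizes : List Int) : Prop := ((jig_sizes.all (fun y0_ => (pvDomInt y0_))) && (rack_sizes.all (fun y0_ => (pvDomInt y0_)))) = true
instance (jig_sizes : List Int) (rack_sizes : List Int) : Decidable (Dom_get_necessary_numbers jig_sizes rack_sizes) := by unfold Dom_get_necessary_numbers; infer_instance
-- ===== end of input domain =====

-- B replaces A's repeated full rescans of the number set by a frontier/worklist BFS that
-- expands each reachable number once; the ports return the same list on all inputs.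
-- (With a negative jig size both Pythons loop forever; the fuelled ports still agree there.)
-- Each Python set is modelled as its
-- insertion-order element list plus a hash index for membership (the list component is
-- proved below to be exactly the PySem.Set built by PySem.Set.add in program order).


-- a Python set: insertion-order element list + hash index (contains/insert as in CPython)
def pvAddA (st : List Int × Std.HashSet Int) (x : Int) : List Int × Std.HashSet Int :=
  if st.2.contains x then st else (st.1 ++ [x], st.2.insert x)

-- ===== PORT A =====
-- one round's inner double loop: for rack in numbers: for jig in jig_sizes: add rack-jig if >= 0
def pvGenA (jig_sizes : List Int) (nn : List Int × Std.HashSet Int) (rack : Int) :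
    List Int × Std.HashSet Int :=
  jig_sizes.foldl (fun nn jig =>
    if rack - jig ≥ 0 then pvAddA nn (rack - jig) else nn) nn

-- the 'while changed' loop; the fuel only makes it total in Lean (it suffices whenever the Python loop terminates)
def pvLoopA (jig_sizes : List Int) : Nat → (List Int × Std.HashSet Int) → (List Int × Std.HashSet Int)
  | 0, numbers => numbers
  | fuel+1, numbers =>
    let new_numbers := numbers.1.foldl (pvGenA jig_sizes) ([], ∅)
    let numbers' := new_numbers.1.foldl pvAddA numbers      -- numbers.update(new_numbers)
    if new_numbers.1.all (fun x => numbers.2.contains x)    -- new_numbers.issubset(numbers)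
    then numbers' else pvLoopA jig_sizes fuel numbers'

def get_necessary_numbers (jig_sizes : List Int) (rack_sizes : List Int) : List Int :=
  let numbers := rack_sizes.foldl pvAddA (pvAddA ([], ∅) 0) -- add(0); update(rack_sizes)
  let fuel := (rack_sizes.foldl max 0).toNat + 3
  ((jig_sizes.foldl pvAddA (pvLoopA jig_sizes fuel numbers))).1  -- numbers.update(jig_sizes)

-- ===== PORT B =====
-- expand one frontier rack: append each unseen non-negative rack-jig to both set and new frontier
def pvExpandB (jig_sizes : List Int) (st : (List Int × Std.HashSet Int) × List Int) (rack : Int) :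
    (List Int × Std.HashSet Int) × List Int :=
  jig_sizes.foldl (fun st jig =>
    let n := rack - jig
    if n ≥ 0 ∧ ¬ st.1.2.contains n
    then ((st.1.1 ++ [n], st.1.2.insert n), st.2 ++ [n]) else st) st

-- the 'while frontier' loop; the fuel only makes it total in Lean (it suffices whenever the Python loop terminates)
def pvLoopB (jig_sizes : List Int) :
    Nat → (List Int × Std.HashSet Int) → List Int → (List Int × Std.HashSet Int)
  | 0, numbers, _ => numbers
  | fuel+1, numbers, frontier =>
    if frontier = [] then numbers
    else
      let st := frontier.foldl (pvExpandB jig_sizes) (numbers, [])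
      pvLoopB jig_sizes fuel st.1 st.2

def get_necessary_numbers_alt (jig_sizes : List Int) (rack_sizes : List Int) : List Int :=
  let st0 := rack_sizes.foldl (fun st r =>
      if ¬ st.1.2.contains r
      then ((st.1.1 ++ [r], st.1.2.insert r), st.2 ++ [r]) else st)
    (([0], (∅ : Std.HashSet Int).insert 0), [0])
  let fuel := (rack_sizes.foldl max 0).toNat + 3
  (jig_sizes.foldl pvAddA (pvLoopB jig_sizes fuel st0.1 st0.2)).1  -- numbers.update(jig_sizes)

-- ===== PRECONDITION & SPEC =====
def Spec_get_necessary_numbers (jig_sizes : List Int) (rack_sizes : List Int) (out : List Int) : Prop := out = get_necessary_numbers_alt jig_sizes rack_sizes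
instance (jig_sizes : List Int) (rack_sizes : List Int) (out : List Int) : Decidable (Spec_get_necessary_numbers jig_sizes rack_sizes out) := by unfold Spec_get_necessary_numbers; infer_instance

-- ===== CLAIM (what is proved, stated in full; the proofs are below) =====
def Claim_equal_get_necessary_numbers : Prop := ∀ (jig_sizes : List Int) (rack_sizes : List Int), Dom_get_necessary_numbers jig_sizes rack_sizes → Spec_get_necessary_numbers jig_sizes rack_sizes (get_necessary_numbers jig_sizes rack_sizes)

-- ===== LEMMAS AND PROOFS =====

-- ---- list-level (PySem.Set) images of the two programs ----

def pvGenL (jig_sizes : List Int) (nn : PySem.Set Int) (rack : Int) : PySem.Set Int :=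
  jig_sizes.foldl (fun nn jig =>
    if rack - jig ≥ 0 then PySem.Set.add nn (rack - jig) else nn) nn

def pvLoopAL (jig_sizes : List Int) : Nat → PySem.Set Int → PySem.Set Int
  | 0, numbers => numbers
  | fuel+1, numbers =>
    let new_numbers := numbers.foldl (pvGenL jig_sizes) PySem.Set.empty
    let numbers' := PySem.Set.update numbers new_numbers
    if PySem.Set.issubset new_numbers numbers then numbers'
    else pvLoopAL jig_sizes fuel numbers'

def pvExpandBL (jig_sizes : List Int) (st : PySem.Set Int × List Int) (rack : Int) : PySem.Set Int × List Int :=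
  jig_sizes.foldl (fun st jig =>
    let n := rack - jig
    if n ≥ 0 ∧ n ∉ st.1 then (PySem.Set.add st.1 n, st.2 ++ [n]) else st) st

def pvLoopBL (jig_sizes : List Int) : Nat → PySem.Set Int → List Int → PySem.Set Int
  | 0, numbers, _ => numbers
  | fuel+1, numbers, frontier =>
    if frontier = [] then numbers
    else
      let st := frontier.foldl (pvExpandBL jig_sizes) (numbers, [])
      pvLoopBL jig_sizes fuel st.1 st.2

-- ---- the hash index is sound: the list component is the PySem.Set computation ----

def pvInv (st : List Int × Std.HashSet Int) : Prop :=
  ∀ y : Int, st.2.contains y = true ↔ y ∈ st.1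

theorem pvAdd_char (s : List Int) (n : Int) :
    PySem.Set.add s n = if n ∈ s then s else s ++ [n] := by
  simp [PySem.Set.add, PySem.Set.contains]

theorem pvAddA_fst (st : List Int × Std.HashSet Int) (x : Int) (h : pvInv st) :
    (pvAddA st x).1 = PySem.Set.add st.1 x := by
  rw [pvAdd_char]
  by_cases hx : x ∈ st.1
  · rw [pvAddA, if_pos ((h x).mpr hx), if_pos hx]
  · rw [pvAddA, if_neg (fun hc => hx ((h x).mp hc)), if_neg hx]

theorem pvAddA_inv (st : List Int × Std.HashSet Int) (x : Int) (h : pvInv st) :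
    pvInv (pvAddA st x) := by
  by_cases hc : st.2.contains x = true
  · rw [pvAddA, if_pos hc]; exact h
  · rw [pvAddA, if_neg hc]
    intro y
    simp only [Std.HashSet.contains_insert, List.mem_append, List.mem_singleton,
      Bool.or_eq_true, beq_iff_eq]
    rw [h y]
    tauto

theorem pvFoldAddA (L : List Int) : ∀ (st : List Int × Std.HashSet Int), pvInv st →
    (L.foldl pvAddA st).1 = L.foldl PySem.Set.add st.1 ∧ pvInv (L.foldl pvAddA st) := by
  induction L with
  | nil => intro st h; exact ⟨rfl, h⟩
  | cons x L ih =>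
    intro st h
    simp only [List.foldl_cons]
    rcases ih (pvAddA st x) (pvAddA_inv st x h) with ⟨h1, h2⟩
    exact ⟨by rw [h1, pvAddA_fst st x h], h2⟩

theorem pvInv_empty : pvInv ([], ∅) := by
  intro y; simp

theorem pvGenA_bridge (jig_sizes : List Int) (rack : Int) :
    ∀ (nn : List Int × Std.HashSet Int), pvInv nn →
    (pvGenA jig_sizes nn rack).1 = pvGenL jig_sizes nn.1 rack
      ∧ pvInv (pvGenA jig_sizes nn rack) := by
  induction jig_sizes with
  | nil => intro nn h; exact ⟨rfl, h⟩
  | cons j js ih =>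
    intro nn h
    by_cases hj : rack - j ≥ 0
    · simp only [pvGenA, pvGenL, List.foldl_cons, if_pos hj] at ih ⊢
      rcases ih (pvAddA nn (rack - j)) (pvAddA_inv nn _ h) with ⟨h1, h2⟩
      refine ⟨?_, h2⟩
      rw [h1, pvAddA_fst nn _ h]
    · simp only [pvGenA, pvGenL, List.foldl_cons, if_neg hj] at ih ⊢
      exact ih nn h

theorem pvGenFold_bridge (xs : List Int) (jig_sizes : List Int) :
    ∀ (nn : List Int × Std.HashSet Int), pvInv nn →
    (xs.foldl (pvGenA jig_sizes) nn).1 = xs.foldl (pvGenL jig_sizes) nn.1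
      ∧ pvInv (xs.foldl (pvGenA jig_sizes) nn) := by
  induction xs with
  | nil => intro nn h; exact ⟨rfl, h⟩
  | cons x xs ih =>
    intro nn h
    simp only [List.foldl_cons]
    rcases pvGenA_bridge jig_sizes x nn h with ⟨g1, g2⟩
    rcases ih (pvGenA jig_sizes nn x) g2 with ⟨h1, h2⟩
    exact ⟨by rw [h1, g1], h2⟩

theorem pvSubset_bridge (L : List Int) (t : List Int × Std.HashSet Int) (h : pvInv t) :
    (L.all (fun x => t.2.contains x)) = PySem.Set.issubset L t.1 := by
  rcases Bool.eq_false_or_eq_true (PySem.Set.issubset L t.1) with hs | hs <;> rw [hs]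
  · rw [List.all_eq_true]
    intro x hx
    exact (h x).mpr ((PySem.Set.issubset_iff _ _).mp hs x hx)
  · rw [Bool.eq_false_iff]
    intro hall
    rw [List.all_eq_true] at hall
    have hsub : PySem.Set.issubset L t.1 = true :=
      (PySem.Set.issubset_iff _ _).mpr (fun x hx => (h x).mp (hall x hx))
    rw [hs] at hsub
    exact Bool.false_ne_true hsub

theorem pvLoopA_bridge (jig_sizes : List Int) : ∀ (fuel : Nat) (numbers : List Int × Std.HashSet Int),
    pvInv numbers →
    (pvLoopA jig_sizes fuel numbers).1 = pvLoopAL jig_sizes fuel numbers.1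
      ∧ pvInv (pvLoopA jig_sizes fuel numbers) := by
  intro fuel
  induction fuel with
  | zero => intro numbers h; exact ⟨rfl, h⟩
  | succ fuel ih =>
    intro numbers h
    rcases pvGenFold_bridge numbers.1 jig_sizes ([], ∅) pvInv_empty with ⟨g1, g2⟩
    have g1' : (numbers.1.foldl (pvGenA jig_sizes) ([], ∅)).1
        = numbers.1.foldl (pvGenL jig_sizes) PySem.Set.empty := g1
    rcases pvFoldAddA (numbers.1.foldl (pvGenA jig_sizes) ([], ∅)).1 numbers h with ⟨u1, u2⟩
    have hcond : ((numbers.1.foldl (pvGenA jig_sizes) ([], ∅)).1.all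
        (fun x => numbers.2.contains x))
        = PySem.Set.issubset (numbers.1.foldl (pvGenL jig_sizes) PySem.Set.empty) numbers.1 := by
      rw [pvSubset_bridge _ numbers h, g1']
    have hupd : ((numbers.1.foldl (pvGenA jig_sizes) ([], ∅)).1.foldl pvAddA numbers).1
        = PySem.Set.update numbers.1 (numbers.1.foldl (pvGenL jig_sizes) PySem.Set.empty) := by
      rw [u1, g1']; rfl
    simp only [pvLoopA, pvLoopAL]
    by_cases hc : PySem.Set.issubset (numbers.1.foldl (pvGenL jig_sizes) PySem.Set.empty) numbers.1 = true
    · rw [if_pos (by rw [hcond]; exact hc), if_pos hc]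
      exact ⟨hupd, u2⟩
    · rw [if_neg (by rw [hcond]; exact hc), if_neg hc]
      rcases ih _ u2 with ⟨l1, l2⟩
      refine ⟨?_, l2⟩
      rw [l1, hupd]

theorem pvExpandB_bridge (jig_sizes : List Int) (rack : Int) :
    ∀ (st : (List Int × Std.HashSet Int) × List Int), pvInv st.1 →
    (pvExpandB jig_sizes st rack).1.1 = (pvExpandBL jig_sizes (st.1.1, st.2) rack).1
      ∧ (pvExpandB jig_sizes st rack).2 = (pvExpandBL jig_sizes (st.1.1, st.2) rack).2
      ∧ pvInv (pvExpandB jig_sizes st rack).1 := by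
  induction jig_sizes with
  | nil => intro st h; exact ⟨rfl, rfl, h⟩
  | cons j js ih =>
    intro st h
    by_cases hj : rack - j ≥ 0
    · by_cases hc : rack - j ∈ st.1.1
      · have hb : st.1.2.contains (rack - j) = true := (h _).mpr hc
        simp only [pvExpandB, pvExpandBL, List.foldl_cons,
          if_neg (fun hand => hand.2 hb : ¬(rack - j ≥ 0 ∧ ¬ st.1.2.contains (rack - j) = true)),
          if_neg (fun hand => hand.2 hc : ¬(rack - j ≥ 0 ∧ rack - j ∉ st.1.1))]
        exact ih st h
      · have hb : ¬ st.1.2.contains (rack - j) = true := fun hx => hc ((h _).mp hx)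
        have hinv : pvInv (st.1.1 ++ [rack - j], st.1.2.insert (rack - j)) := by
          have := pvAddA_inv st.1 (rack - j) h
          rwa [pvAddA, if_neg hb] at this
        have hstep : (PySem.Set.add st.1.1 (rack - j), st.2 ++ [rack - j])
            = (st.1.1 ++ [rack - j], st.2 ++ [rack - j]) := by
          rw [pvAdd_char, if_neg hc]
        simp only [pvExpandB, pvExpandBL, List.foldl_cons,
          if_pos (And.intro hj hb), if_pos (And.intro hj hc)]
        rw [hstep]
        exact ih ((st.1.1 ++ [rack - j], st.1.2.insert (rack - j)), st.2 ++ [rack - j]) hinv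
    · simp only [pvExpandB, pvExpandBL, List.foldl_cons,
        if_neg (fun hand => hj hand.1 : ¬(rack - j ≥ 0 ∧ ¬ st.1.2.contains (rack - j) = true)),
        if_neg (fun hand => hj hand.1 : ¬(rack - j ≥ 0 ∧ rack - j ∉ st.1.1))]
      exact ih st h

theorem pvExpandFold_bridge (xs : List Int) (jig_sizes : List Int) :
    ∀ (st : (List Int × Std.HashSet Int) × List Int), pvInv st.1 →
    (xs.foldl (pvExpandB jig_sizes) st).1.1 = (xs.foldl (pvExpandBL jig_sizes) (st.1.1, st.2)).1
      ∧ (xs.foldl (pvExpandB jig_sizes) st).2 = (xs.foldl (pvExpandBL jig_sizes) (st.1.1, st.2)).2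
      ∧ pvInv (xs.foldl (pvExpandB jig_sizes) st).1 := by
  induction xs with
  | nil => intro st h; exact ⟨rfl, rfl, h⟩
  | cons x xs ih =>
    intro st h
    simp only [List.foldl_cons]
    rcases pvExpandB_bridge jig_sizes x st h with ⟨e1, e2, e3⟩
    rcases ih (pvExpandB jig_sizes st x) e3 with ⟨h1, h2, h3⟩
    have hst : ((pvExpandB jig_sizes st x).1.1, (pvExpandB jig_sizes st x).2)
        = pvExpandBL jig_sizes (st.1.1, st.2) x := by
      rw [e1, e2]
    rw [hst] at h1 h2
    exact ⟨h1, h2, h3⟩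

theorem pvLoopB_bridge (jig_sizes : List Int) : ∀ (fuel : Nat)
    (numbers : List Int × Std.HashSet Int) (frontier : List Int), pvInv numbers →
    (pvLoopB jig_sizes fuel numbers frontier).1 = pvLoopBL jig_sizes fuel numbers.1 frontier
      ∧ pvInv (pvLoopB jig_sizes fuel numbers frontier) := by
  intro fuel
  induction fuel with
  | zero => intro numbers frontier h; exact ⟨rfl, h⟩
  | succ fuel ih =>
    intro numbers frontier h
    by_cases hF : frontier = []
    · subst hF
      have eA : pvLoopB jig_sizes (fuel+1) numbers [] = numbers := by simp [pvLoopB]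
      have eB : pvLoopBL jig_sizes (fuel+1) numbers.1 [] = numbers.1 := by simp [pvLoopBL]
      rw [eA, eB]
      exact ⟨rfl, h⟩
    · simp only [pvLoopB, pvLoopBL, if_neg hF]
      rcases pvExpandFold_bridge frontier jig_sizes (numbers, []) h with ⟨e1, e2, e3⟩
      rcases ih (frontier.foldl (pvExpandB jig_sizes) (numbers, [])).1
        (frontier.foldl (pvExpandB jig_sizes) (numbers, [])).2 e3 with ⟨h1, h2⟩
      exact ⟨by rw [h1, e1, e2], h2⟩


-- one frontier insertion, on the successor list (list level)
def pvStep2 (st : PySem.Set Int × List Int) (n : Int) : PySem.Set Int × List Int :=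
  if n ∈ st.1 then st else (st.1 ++ [n], st.2 ++ [n])

theorem pvSeed_bridge (rack_sizes : List Int) :
    ∀ (st : (List Int × Std.HashSet Int) × List Int), pvInv st.1 →
    (rack_sizes.foldl (fun st r =>
        if ¬ st.1.2.contains r
        then ((st.1.1 ++ [r], st.1.2.insert r), st.2 ++ [r]) else st) st).1.1
      = (rack_sizes.foldl pvStep2 (st.1.1, st.2)).1
    ∧ (rack_sizes.foldl (fun st r =>
        if ¬ st.1.2.contains r
        then ((st.1.1 ++ [r], st.1.2.insert r), st.2 ++ [r]) else st) st).2
      = (rack_sizes.foldl pvStep2 (st.1.1, st.2)).2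
    ∧ pvInv (rack_sizes.foldl (fun st r =>
        if ¬ st.1.2.contains r
        then ((st.1.1 ++ [r], st.1.2.insert r), st.2 ++ [r]) else st) st).1 := by
  induction rack_sizes with
  | nil => intro st h; exact ⟨rfl, rfl, h⟩
  | cons r rs ih =>
    intro st h
    simp only [List.foldl_cons]
    by_cases hc : r ∈ st.1.1
    · have hb : st.1.2.contains r = true := (h _).mpr hc
      rw [if_neg (by simp [hb]), show pvStep2 (st.1.1, st.2) r = (st.1.1, st.2) by
        simp [pvStep2, hc]]
      exact ih st h
    · have hb : ¬ st.1.2.contains r = true := fun hx => hc ((h _).mp hx)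
      rw [if_pos (by simp [hb]), show pvStep2 (st.1.1, st.2) r = (st.1.1 ++ [r], st.2 ++ [r]) by
        simp [pvStep2, hc]]
      have hinv : pvInv (st.1.1 ++ [r], st.1.2.insert r) := by
        have := pvAddA_inv st.1 r h
        rwa [pvAddA, if_neg hb] at this
      exact ih ((st.1.1 ++ [r], st.1.2.insert r), st.2 ++ [r]) hinv

-- ---- the list-level fixed-point rescan equals the list-level frontier BFS ----

-- the non-negative successors of a rack, in jig order
def pvSuccs (jig_sizes : List Int) (rack : Int) : List Int :=
  (jig_sizes.filter (fun j => rack - j ≥ 0)).map (fun j => rack - j)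

-- the sublist of L actually appended when L's elements are added in order to the set s
def pvNews (s : List Int) : List Int → List Int
  | [] => []
  | n :: L => if n ∈ s then pvNews s L else n :: pvNews (s ++ [n]) L

theorem pvGenL_eq (jig_sizes : List Int) (rack : Int) :
    ∀ nn, pvGenL jig_sizes nn rack = (pvSuccs jig_sizes rack).foldl PySem.Set.add nn := by
  induction jig_sizes with
  | nil => intro nn; rfl
  | cons j js ih =>
    intro nn
    by_cases h : rack - j ≥ 0 <;>
      simp only [pvGenL, pvSuccs, List.foldl_cons, List.filter_cons, h, decide_true,
        decide_false, if_true, if_false, List.map_cons] at ih ⊢ <;>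
      exact ih _

theorem pvExpandBL_eq (jig_sizes : List Int) (rack : Int) :
    ∀ st, pvExpandBL jig_sizes st rack = (pvSuccs jig_sizes rack).foldl pvStep2 st := by
  induction jig_sizes with
  | nil => intro st; rfl
  | cons j js ih =>
    intro st
    by_cases h : rack - j ≥ 0
    · by_cases hc : rack - j ∈ st.1 <;>
      · simp only [pvExpandBL, pvSuccs, List.foldl_cons, List.filter_cons, h, hc, decide_true,
          if_true, if_false, List.map_cons, pvStep2, pvAdd_char, and_true, and_false,
          not_true, not_false_iff] at ih ⊢
        exact ih _
    · simp only [pvExpandBL, pvSuccs, List.foldl_cons, List.filter_cons, h, decide_false,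
        if_false, false_and] at ih ⊢
      exact ih _

theorem pvFold_flatMap {β : Type} (f : β → Int → β) (g : Int → List Int) :
    ∀ (xs : List Int) (acc : β),
      xs.foldl (fun b r => (g r).foldl f b) acc = (xs.flatMap g).foldl f acc := by
  intro xs
  induction xs with
  | nil => intro acc; rfl
  | cons x xs ih => intro acc; simp [List.foldl_append, ih]

theorem pvFoldAdd_news : ∀ (L s : List Int), L.foldl PySem.Set.add s = s ++ pvNews s L := by
  intro L
  induction L with
  | nil => intro s; simp [pvNews]
  | cons n L ih =>
    intro s
    by_cases h : n ∈ s <;> simp [pvNews, h, pvAdd_char, ih]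

theorem pvFoldStep2_news : ∀ (L s nf : List Int),
    L.foldl pvStep2 (s, nf) = (s ++ pvNews s L, nf ++ pvNews s L) := by
  intro L
  induction L with
  | nil => intro s nf; simp [pvNews]
  | cons n L ih =>
    intro s nf
    by_cases h : n ∈ s <;> simp [pvNews, pvStep2, h, ih]

theorem pvNews_nil_iff (L : List Int) : ∀ s, pvNews s L = [] ↔ ∀ n ∈ L, n ∈ s := by
  induction L with
  | nil => intro s; simp [pvNews]
  | cons n L ih =>
    intro s
    by_cases h : n ∈ s <;> simp [pvNews, h, ih]

theorem pvMem_foldAdd (L s : List Int) (x : Int) :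
    x ∈ L.foldl PySem.Set.add s ↔ x ∈ s ∨ x ∈ L := by
  have := PySem.Set.mem_update (y := x) (s := s) (xs := L)
  simpa [PySem.Set.update] using this

theorem pvFoldAdd_absorb (L s : List Int) (h : ∀ x ∈ L, x ∈ s) :
    L.foldl PySem.Set.add s = s := by
  rw [pvFoldAdd_news, (pvNews_nil_iff L s).mpr h, List.append_nil]

theorem pvFoldAdd_foldAdd (L : List Int) : ∀ (t s : List Int),
    (L.foldl PySem.Set.add t).foldl PySem.Set.add s
      = L.foldl PySem.Set.add (t.foldl PySem.Set.add s) := by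
  induction L with
  | nil => intro t s; rfl
  | cons x L ih =>
    intro t s
    simp only [List.foldl_cons]
    rw [ih]
    congr 1
    by_cases hx : x ∈ t
    · rw [pvAdd_char t x, if_pos hx, pvAdd_char, if_pos]
      exact (pvMem_foldAdd t s x).mpr (Or.inr hx)
    · rw [pvAdd_char t x, if_neg hx, List.foldl_append]
      rfl

theorem pvLoopBL_nil (jig_sizes : List Int) (fuel : Nat) (numbers : PySem.Set Int) :
    pvLoopBL jig_sizes fuel numbers [] = numbers := by
  cases fuel <;> simp [pvLoopBL]

-- A's full-rescan round, rewritten through the flattened successor list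
theorem pvGenFold_eq (jig_sizes : List Int) (xs : List Int) (nn : PySem.Set Int) :
    xs.foldl (pvGenL jig_sizes) nn
      = (xs.flatMap (pvSuccs jig_sizes)).foldl PySem.Set.add nn := by
  have hfun : pvGenL jig_sizes = fun nn r => (pvSuccs jig_sizes r).foldl PySem.Set.add nn := by
    funext nn r; exact pvGenL_eq jig_sizes r nn
  rw [hfun, pvFold_flatMap]

-- B's frontier round, rewritten through the flattened successor list
theorem pvExpandFold_eq (jig_sizes : List Int) (xs : List Int) (st : PySem.Set Int × List Int) :
    xs.foldl (pvExpandBL jig_sizes) st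
      = (xs.flatMap (pvSuccs jig_sizes)).foldl pvStep2 st := by
  have hfun : pvExpandBL jig_sizes = fun st r => (pvSuccs jig_sizes r).foldl pvStep2 st := by
    funext st r; exact pvExpandBL_eq jig_sizes r st
  rw [hfun, pvFold_flatMap]

-- main loop invariant: numbers = P ++ F where every successor of P is already present
theorem pvMain (jig_sizes : List Int) : ∀ (fuel : Nat) (P F : List Int),
    (∀ r ∈ P, ∀ n ∈ pvSuccs jig_sizes r, n ∈ P ++ F) →
    pvLoopAL jig_sizes fuel (P ++ F) = pvLoopBL jig_sizes fuel (P ++ F) F := by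
  intro fuel
  induction fuel with
  | zero => intro P F _; rfl
  | succ fuel ih =>
    intro P F hcl
    have hPsub : ∀ x ∈ P.flatMap (pvSuccs jig_sizes), x ∈ P ++ F := by
      intro x hx
      rcases List.mem_flatMap.mp hx with ⟨r, hr, hxr⟩
      exact hcl r hr x hxr
    -- A's round
    have hnew : (P ++ F).foldl (pvGenL jig_sizes) PySem.Set.empty
        = ((P ++ F).flatMap (pvSuccs jig_sizes)).foldl PySem.Set.add [] :=
      pvGenFold_eq jig_sizes (P ++ F) PySem.Set.empty
    have hupd : PySem.Set.update (P ++ F) ((P ++ F).foldl (pvGenL jig_sizes) PySem.Set.empty)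
        = (P ++ F) ++ pvNews (P ++ F) (F.flatMap (pvSuccs jig_sizes)) := by
      show (((P ++ F).foldl (pvGenL jig_sizes) PySem.Set.empty).foldl PySem.Set.add (P ++ F)) = _
      rw [hnew, pvFoldAdd_foldAdd]
      show (((P ++ F).flatMap (pvSuccs jig_sizes)).foldl PySem.Set.add (P ++ F)) = _
      rw [List.flatMap_append, List.foldl_append, pvFoldAdd_absorb _ _ hPsub, pvFoldAdd_news]
    -- the subset test says exactly: the frontier produced nothing new
    have hsub : PySem.Set.issubset ((P ++ F).foldl (pvGenL jig_sizes) PySem.Set.empty) (P ++ F) = true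
        ↔ pvNews (P ++ F) (F.flatMap (pvSuccs jig_sizes)) = [] := by
      rw [PySem.Set.issubset_iff, pvNews_nil_iff]
      constructor
      · intro h n hn
        apply h
        rw [hnew, pvMem_foldAdd]
        exact Or.inr (by rw [List.flatMap_append]; exact List.mem_append_right _ hn)
      · intro h x hx
        rw [hnew, pvMem_foldAdd] at hx
        rcases hx with hx | hx
        · exact absurd hx (List.not_mem_nil)
        · rw [List.flatMap_append, List.mem_append] at hx
          rcases hx with hx | hx
          · exact hPsub x hx
          · exact h x hx
    -- B's round
    have hstB : F.foldl (pvExpandBL jig_sizes) ((P ++ F), ([] : List Int))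
        = ((P ++ F) ++ pvNews (P ++ F) (F.flatMap (pvSuccs jig_sizes)),
           pvNews (P ++ F) (F.flatMap (pvSuccs jig_sizes))) := by
      rw [pvExpandFold_eq, pvFoldStep2_news]
      simp
    by_cases hF : F = []
    · subst hF
      have hnil : pvNews (P ++ []) (List.flatMap (pvSuccs jig_sizes) []) = [] := by
        simp [pvNews]
      have hA : pvLoopAL jig_sizes (fuel+1) (P ++ []) = P ++ [] := by
        simp only [pvLoopAL]
        rw [if_pos (hsub.mpr hnil), hupd, hnil, List.append_nil]
      rw [hA, pvLoopBL_nil]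
    · by_cases hnews : pvNews (P ++ F) (F.flatMap (pvSuccs jig_sizes)) = []
      · simp only [pvLoopAL, pvLoopBL, if_neg hF]
        rw [if_pos (hsub.mpr hnews), hupd, hnews, List.append_nil, hstB, hnews,
          List.append_nil, pvLoopBL_nil]
      · simp only [pvLoopAL, pvLoopBL, if_neg hF]
        rw [if_neg (by rw [hsub]; exact hnews), hupd, hstB]
        have hcl2 : ∀ r ∈ (P ++ F), ∀ n ∈ pvSuccs jig_sizes r,
            n ∈ (P ++ F) ++ pvNews (P ++ F) (F.flatMap (pvSuccs jig_sizes)) := by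
          intro r hr n hn
          rcases List.mem_append.mp hr with hrP | hrF
          · exact List.mem_append_left _ (hcl r hrP n hn)
          · have : n ∈ (F.flatMap (pvSuccs jig_sizes)).foldl PySem.Set.add (P ++ F) :=
              (pvMem_foldAdd _ _ n).mpr (Or.inr (List.mem_flatMap.mpr ⟨r, hrF, hn⟩))
            rwa [pvFoldAdd_news] at this
        exact ih (P ++ F) _ hcl2

-- ===== VERDICT (by name: the statement is the Claim_ definition above) =====
theorem get_necessary_numbers_spec : Claim_equal_get_necessary_numbers := by
  intro jig_sizes rack_sizes _
  unfold Spec_get_necessary_numbers get_necessary_numbers get_necessary_numbers_alt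
  -- the common seed set, list level
  set n0 : List Int := rack_sizes.foldl PySem.Set.add [0] with hn0
  -- A side: hash state -> list level
  have hinv1 : pvInv (pvAddA ([], ∅) 0) := pvAddA_inv _ _ pvInv_empty
  have hfst1 : (pvAddA ([], ∅) 0).1 = [0] := by rw [pvAddA_fst _ _ pvInv_empty]; rfl
  rcases pvFoldAddA rack_sizes (pvAddA ([], ∅) 0) hinv1 with ⟨hs1, hs2⟩
  rw [hfst1] at hs1
  rcases pvLoopA_bridge jig_sizes ((rack_sizes.foldl max 0).toNat + 3)
    (rack_sizes.foldl pvAddA (pvAddA ([], ∅) 0)) hs2 with ⟨hl1, hl2⟩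
  rcases pvFoldAddA jig_sizes _ hl2 with ⟨hu1, _⟩
  rw [hu1, hl1, hs1]
  -- B side: hash state -> list level
  rcases pvSeed_bridge rack_sizes (([0], (∅ : Std.HashSet Int).insert 0), [0])
    (by
      intro y
      rw [Std.HashSet.contains_insert]
      simp only [List.mem_singleton, Bool.or_eq_true, beq_iff_eq]
      constructor
      · rintro (h | h)
        · exact h.symm
        · simp at h
      · intro h; exact Or.inl h.symm) with ⟨hb1, hb2, hb3⟩
  have hseedL : rack_sizes.foldl pvStep2 (([0] : List Int), ([0] : List Int)) = (n0, n0) := by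
    rw [pvFoldStep2_news rack_sizes [0] [0], hn0, pvFoldAdd_news]
  rw [hseedL] at hb1 hb2
  rcases pvLoopB_bridge jig_sizes ((rack_sizes.foldl max 0).toNat + 3) _ _ hb3 with ⟨hr1, hr2⟩
  rcases pvFoldAddA jig_sizes _ hr2 with ⟨hv1, _⟩
  rw [hv1, hr1, hb1, hb2]
  -- both sides are now list level; apply the main loop equivalence with P = [], F = n0
  have hmain := pvMain jig_sizes ((rack_sizes.foldl max 0).toNat + 3) [] n0
    (by intro r hr; exact absurd hr (List.not_mem_nil))
  simp only [List.nil_append] at hmain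
  rw [hmain]
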